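-- pv_equiv track=rewrite | github.com/alexa/visitron | tasks/FINAL_TASK/utils_data.py | truncate_dialogs
-- ===== SOURCE A (Python) =====
-- from itertools import chain
--
-- def truncate_dialogs(sentences, amount, left=True):
--     """
--     Truncate `dialogs` at a token-level TO the specified `amount` FROM the direction specified by `left`
--     Consider length of each dialog to be len(dialog) + 1 as `[QUES]` or `[ANS]` tag needs to be counted as well.
--     """
--
--     if amount is None:
--         return sentences
--
--     if (len(list(chain(*sentences))) + len(sentences)) <= amount:
--         return sentences
--
--     if left:
--         reversed_sentences = sentences[::-1]
--         reversed_truncated_sentences = []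
--         amount_appended = 0
--         for turn in reversed_sentences:
--             if amount_appended < amount:
--                 remaining_amount = amount - amount_appended
--                 if (len(turn) + 1) <= remaining_amount:
--                     reversed_truncated_sentences.append(turn)
--                     amount_appended += len(turn) + 1
--                 else:
--                     reversed_truncated_sentences.append(turn[-remaining_amount + 1 :])
--                     amount_appended += len(turn[-remaining_amount + 1 :]) + 1
--                     break  # can break out of the loop at this point
--         truncated_sentences = reversed_truncated_sentences[::-1]
--         return truncated_sentences
--     else:
--         truncated_sentences = []
--         amount_appended = 0
--         for turn in sentences:
--             if amount_appended < amount: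
--                 remaining_amount = amount - amount_appended
--                 if (len(turn) + 1) <= remaining_amount:
--                     truncated_sentences.append(turn)
--                     amount_appended += len(turn) + 1
--                 else:
--                     truncated_sentences.append(turn[: remaining_amount - 1])
--                     amount_appended += len(turn[: remaining_amount - 1]) + 1
--                     break  # can break out of the loop at this point
--         return truncated_sentences
-- ===== SOURCE B (Python) =====
-- from itertools import accumulate
--
--
-- def truncate_dialogs(sentences, amount, left=True):
--     if amount is None:
--         return sentences
--     turns = sentences[::-1] if left else sentences
--     # prefix-sum table of per-turn costs len(turn)+1
--     prefix = list(accumulate(len(t) + 1 for t in turns))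
--     if not prefix or prefix[-1] <= amount:
--         return sentences
--     # binary search (bisect_right) for the first turn whose cumulative cost exceeds the budget
--     lo, hi = 0, len(prefix)
--     while lo < hi:
--         mid = (lo + hi) // 2
--         if prefix[mid] <= amount:
--             lo = mid + 1
--         else:
--             hi = mid
--     i = lo
--     used = prefix[i - 1] if i else 0
--     r = amount - used
--     out = turns[:i]
--     if r >= 1:
--         t = turns[i]
--         out.append(t[-(r - 1):] if left else t[:r - 1])
--     return out[::-1] if left else out
-- ===== Notes on version B (the rewrite author's own statement) =====
-- stated objective: alternative
-- what changed: B builds a prefix-sum table of per-turn costs with itertools.accumulate and locates the cutoff turn by binary search (bisect_right by hand), then assembles the result as turns[:i] plus one partial slice, instead of A's greedy accumulate-append-break loop duplicated per direction.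
import Mathlib
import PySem

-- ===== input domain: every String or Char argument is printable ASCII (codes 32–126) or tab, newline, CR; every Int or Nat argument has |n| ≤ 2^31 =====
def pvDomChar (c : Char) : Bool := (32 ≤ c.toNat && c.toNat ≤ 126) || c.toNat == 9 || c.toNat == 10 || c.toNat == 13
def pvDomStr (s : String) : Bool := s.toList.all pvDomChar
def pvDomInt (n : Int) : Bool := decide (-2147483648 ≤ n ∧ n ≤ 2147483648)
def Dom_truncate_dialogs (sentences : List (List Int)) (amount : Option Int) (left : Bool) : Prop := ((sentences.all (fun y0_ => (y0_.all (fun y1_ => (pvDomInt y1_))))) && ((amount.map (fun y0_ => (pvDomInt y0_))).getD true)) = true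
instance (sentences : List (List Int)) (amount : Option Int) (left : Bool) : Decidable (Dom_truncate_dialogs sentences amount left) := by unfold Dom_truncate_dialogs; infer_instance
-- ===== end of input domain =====

-- B replaces A's two accumulate-append-break loops by a prefix-sum table of per-turn costs plus a
-- binary search for the cutoff turn, then direct assembly (turns[:i] ++ one partial slice).

-- ===== PORT A =====
-- the `if left:` loop of A: walks reversed turns, appending full turns, one partial slice, then nothing
def aLoopLeft : List (List Int) → Int → Int → List (List Int)
  | [], _, _ => []
  | turn :: rest, amount, acc =>
    if acc < amount then
      let r := amount - acc
      if (turn.length : Int) + 1 ≤ r then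
        turn :: aLoopLeft rest amount (acc + turn.length + 1)
      else
        [PySem.List.slice turn (some (-r + 1)) none]   -- turn[-remaining_amount + 1 :]
    else
      aLoopLeft rest amount acc   -- loop keeps iterating, appending nothing

-- the `else:` loop of A: same walk over the turns in order, slicing from the front
def aLoopRight : List (List Int) → Int → Int → List (List Int)
  | [], _, _ => []
  | turn :: rest, amount, acc =>
    if acc < amount then
      let r := amount - acc
      if (turn.length : Int) + 1 ≤ r then
        turn :: aLoopRight rest amount (acc + turn.length + 1)
      else
        [PySem.List.slice turn none (some (r - 1))]   -- turn[: remaining_amount - 1]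
    else
      aLoopRight rest amount acc

def truncate_dialogs (sentences : List (List Int)) (amount : Option Int) (left : Bool) : List (List Int) :=
  match amount with
  | none => sentences
  | some a =>
    if (sentences.flatten.length : Int) + sentences.length ≤ a then sentences
    else if left then
      -- sentences[::-1] is List.reverse, twice
      (aLoopLeft sentences.reverse a 0).reverse
    else
      aLoopRight sentences a 0

-- ===== PORT B =====
-- itertools.accumulate of the per-turn costs: running prefix sums
def pyAccum : Int → List Int → List Int
  | _, [] => []
  | acc, c :: cs => (acc + c) :: pyAccum (acc + c) cs

-- the hand-written bisect_right loop of Source B: first index with pre[idx] > amount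
-- (structural recursion on a fuel counter hi - lo, which bounds the loop's iteration count)
def bsearchGo : Nat → List Int → Int → Nat → Nat → Nat
  | 0, _, _, lo, _ => lo
  | Nat.succ fuel, pre, amount, lo, hi =>
    if lo < hi then
      let mid := (lo + hi) / 2
      if pre.getD mid 0 ≤ amount then bsearchGo fuel pre amount (mid + 1) hi
      else bsearchGo fuel pre amount lo mid
    else lo

def bsearchCut (pre : List Int) (amount : Int) (lo hi : Nat) : Nat :=
  bsearchGo (hi - lo) pre amount lo hi

-- the assembly after the early exit of Source B: cutoff index by binary search, turns[:i], one partial slice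
-- (turns[i] is in range here — the early exit guarantees the search stops before the end; getD is exact)
def bAssemble (turns : List (List Int)) (pre : List Int) (a : Int) (left : Bool) : List (List Int) :=
  let i := bsearchCut pre a 0 pre.length
  let used := if i = 0 then 0 else pre.getD (i - 1) 0
  let r := a - used
  let out := turns.take i
  if 1 ≤ r then
    out ++ [if left then PySem.List.slice (turns.getD i []) (some (-(r - 1))) none
            else PySem.List.slice (turns.getD i []) none (some (r - 1))]
  else out

def truncate_dialogs_alt (sentences : List (List Int)) (amount : Option Int) (left : Bool) : List (List Int) :=
  match amount with
  | none => sentences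
  | some a =>
    let turns := if left then sentences.reverse else sentences
    let pre := pyAccum 0 (turns.map (fun t => (t.length : Int) + 1))
    if pre = [] then sentences                  -- `not prefix`
    else if pre.getLastD 0 ≤ a then sentences   -- `prefix[-1]` (pre nonempty here; getLastD is exact)
    else
      let out := bAssemble turns pre a left
      if left then out.reverse else out

-- ===== PRECONDITION & SPEC =====
-- A is total on the domain, so there is no Pre_.
def Spec_truncate_dialogs (sentences : List (List Int)) (amount : Option Int) (left : Bool) (out : List (List Int)) : Prop := out = truncate_dialogs_alt sentences amount left
instance (sentences : List (List Int)) (amount : Option Int) (left : Bool) (out : List (List Int)) : Decidable (Spec_truncate_dialogs sentences amount left out) := by unfold Spec_truncate_dialogs; infer_instance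

-- ===== CLAIM (what is proved, stated in full; the proofs are below) =====
def Claim_equal_truncate_dialogs : Prop := ∀ (sentences : List (List Int)) (amount : Option Int) (left : Bool), Dom_truncate_dialogs sentences amount left → Spec_truncate_dialogs sentences amount left (truncate_dialogs sentences amount left)

-- ===== LEMMAS AND PROOFS =====

-- PROOF-SIDE reference implementation: a single-pass cutoff scan (used only to bridge A and B)
def bCutoff : List (List Int) → Int → Int → Nat × Int
  | [], _, acc => (0, acc)
  | t :: rest, amount, acc =>
    if acc + t.length + 1 ≤ amount then
      let p := bCutoff rest amount (acc + t.length + 1)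
      (p.1 + 1, p.2)
    else
      (0, acc)

def bBuild (turns : List (List Int)) (amount : Int) (acc : Int) (left : Bool) : List (List Int) :=
  let p := bCutoff turns amount acc
  let out := turns.take p.1
  let rest := turns.drop p.1
  let r := amount - p.2
  match rest with
  | [] => out
  | t :: _ =>
    if 1 ≤ r then
      out ++ (if left then [PySem.List.slice t (some (-(r - 1))) none]
              else [PySem.List.slice t none (some (r - 1))])
    else out

-- first index of pre holding a value > a (reference form of bisect_right)
def firstGT : List Int → Int → Nat
  | [], _ => 0
  | p :: ps, a => if a < p then 0 else firstGT ps a + 1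

lemma firstGT_le_length (pre : List Int) (a : Int) : firstGT pre a ≤ pre.length := by
  induction pre with
  | nil => simp [firstGT]
  | cons p ps ih => simp only [firstGT, List.length_cons]; split <;> omega

lemma firstGT_below (pre : List Int) (a : Int) :
    ∀ k < firstGT pre a, pre.getD k 0 ≤ a := by
  induction pre with
  | nil => intro k hk; simp [firstGT] at hk
  | cons p ps ih =>
    intro k hk
    by_cases hap : a < p
    · simp [firstGT, hap] at hk
    · simp only [firstGT, if_neg hap] at hk
      cases k with
      | zero => simp only [List.getD_cons_zero]; omega
      | succ k' => simp only [List.getD_cons_succ]; exact ih k' (by omega)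

lemma firstGT_hit (pre : List Int) (a : Int) :
    firstGT pre a < pre.length → a < pre.getD (firstGT pre a) 0 := by
  induction pre with
  | nil => intro h; simp at h
  | cons p ps ih =>
    intro h
    by_cases hap : a < p
    · simp [firstGT, hap]
    · simp only [firstGT, if_neg hap, List.length_cons] at h ⊢
      simp only [List.getD_cons_succ]
      exact ih (by omega)

lemma accum_length (costs : List Int) : ∀ acc : Int, (pyAccum acc costs).length = costs.length := by
  induction costs with
  | nil => intro _; rfl
  | cons c cs ih => intro acc; simp [pyAccum, ih]

lemma accum_lb (costs : List Int) : ∀ (acc : Int) (m : Nat), (∀ c ∈ costs, 1 ≤ c) →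
    m < (pyAccum acc costs).length → acc + 1 ≤ (pyAccum acc costs).getD m 0 := by
  induction costs with
  | nil => intro acc m _ hm; simp [pyAccum] at hm
  | cons c cs ih =>
    intro acc m hc hm
    have hc1 : 1 ≤ c := hc c (by simp)
    cases m with
    | zero => simp [pyAccum]; omega
    | succ m' =>
      simp only [pyAccum, List.getD_cons_succ, List.length_cons] at hm ⊢
      have := ih (acc + c) m' (fun d hd => hc d (by simp [hd])) (by simpa [pyAccum] using hm)
      omega

lemma accum_mono (costs : List Int) : ∀ (acc : Int) (k j : Nat), (∀ c ∈ costs, 1 ≤ c) →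
    k ≤ j → j < (pyAccum acc costs).length →
    (pyAccum acc costs).getD k 0 ≤ (pyAccum acc costs).getD j 0 := by
  induction costs with
  | nil => intro acc k j _ _ hj; simp [pyAccum] at hj
  | cons c cs ih =>
    intro acc k j hc hkj hj
    cases j with
    | zero =>
      have hk0 : k = 0 := Nat.le_zero.mp hkj
      subst hk0
      exact le_refl _
    | succ j' =>
      cases k with
      | zero =>
        simp only [pyAccum, List.getD_cons_zero, List.getD_cons_succ, List.length_cons] at hj ⊢
        have := accum_lb cs (acc + c) j' (fun d hd => hc d (by simp [hd])) (by simpa using hj)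
        omega
      | succ k' =>
        simp only [pyAccum, List.getD_cons_succ, List.length_cons] at hj ⊢
        exact ih (acc + c) k' j' (fun d hd => hc d (by simp [hd])) (by omega) (by simpa using hj)

lemma accum_getLast (costs : List Int) : ∀ acc : Int, costs ≠ [] →
    (pyAccum acc costs).getLast? = some (acc + costs.sum) := by
  induction costs with
  | nil => intro _ h; exact absurd rfl h
  | cons c cs ih =>
    intro acc _
    cases cs with
    | nil => simp [pyAccum]
    | cons d ds =>
      have ihh := ih (acc + c) (by simp)
      simp only [pyAccum] at ihh ⊢
      rw [List.getLast?_cons_cons, ihh]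
      simp only [List.sum_cons]
      congr 1
      ring

-- leaf of the binary search: lo = hi pins the answer
lemma bsearch_leaf (pre : List Int) (a : Int) (lo : Nat) (hlo : lo ≤ pre.length)
    (h1 : ∀ k < lo, pre.getD k 0 ≤ a)
    (h2 : ∀ k, lo ≤ k → k < pre.length → a < pre.getD k 0) : lo = firstGT pre a := by
  rcases Nat.lt_trichotomy lo (firstGT pre a) with h | h | h
  · have hlt : lo < pre.length := lt_of_lt_of_le h (firstGT_le_length pre a)
    have := h2 lo le_rfl hlt
    have := firstGT_below pre a lo h
    omega
  · exact h
  · have := h1 _ h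
    have := firstGT_hit pre a (lt_of_lt_of_le h hlo)
    omega

lemma bsearchGo_eq (pre : List Int) (a : Int)
    (hmono : ∀ k j : Nat, k ≤ j → j < pre.length → pre.getD k 0 ≤ pre.getD j 0) :
    ∀ (n lo hi : Nat), hi - lo ≤ n → lo ≤ hi → hi ≤ pre.length →
    (∀ k < lo, pre.getD k 0 ≤ a) → (∀ k, hi ≤ k → k < pre.length → a < pre.getD k 0) →
    bsearchGo n pre a lo hi = firstGT pre a := by
  intro n
  induction n with
  | zero =>
    intro lo hi hn hle hhi h1 h2
    have heq : lo = hi := by omega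
    exact bsearch_leaf pre a lo (by omega) h1 (by rw [heq]; exact h2)
  | succ n ih =>
    intro lo hi hn hle hhi h1 h2
    simp only [bsearchGo]
    by_cases hlh : lo < hi
    · rw [if_pos hlh]
      have hmidlo : lo ≤ (lo + hi) / 2 := by omega
      have hmidhi : (lo + hi) / 2 < hi := by omega
      by_cases hm : pre.getD ((lo + hi) / 2) 0 ≤ a
      · simp only [if_pos hm]
        refine ih ((lo + hi) / 2 + 1) hi (by omega) (by omega) hhi ?_ h2
        intro k hk
        rcases Nat.lt_or_ge k lo with h | h
        · exact h1 k h
        · exact le_trans (hmono k ((lo + hi) / 2) (by omega) (by omega)) hm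
      · simp only [if_neg hm]
        refine ih lo ((lo + hi) / 2) (by omega) (by omega) (by omega) h1 ?_
        intro k hk hklen
        rcases Nat.eq_or_lt_of_le hk with h | h
        · rw [← h]; omega
        · have := hmono ((lo + hi) / 2) k (by omega) hklen
          omega
    · rw [if_neg hlh]
      have heq : lo = hi := by omega
      exact bsearch_leaf pre a lo (by omega) h1 (by rw [heq]; exact h2)

lemma bsearch_eq (pre : List Int) (a : Int)
    (hmono : ∀ k j : Nat, k ≤ j → j < pre.length → pre.getD k 0 ≤ pre.getD j 0) :
    bsearchCut pre a 0 pre.length = firstGT pre a := by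
  exact bsearchGo_eq pre a hmono (pre.length - 0) 0 pre.length le_rfl (by omega) le_rfl
    (by intro k hk; omega) (by intro k hk hk2; omega)

-- the greedy cutoff scan computes the bisect_right answer and the consumed budget
lemma cutoff_eq (turns : List (List Int)) : ∀ a acc : Int,
    bCutoff turns a acc =
      (firstGT (pyAccum acc (turns.map (fun t => (t.length : Int) + 1))) a,
       if firstGT (pyAccum acc (turns.map (fun t => (t.length : Int) + 1))) a = 0 then acc
       else (pyAccum acc (turns.map (fun t => (t.length : Int) + 1))).getD
              (firstGT (pyAccum acc (turns.map (fun t => (t.length : Int) + 1))) a - 1) 0) := by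
  induction turns with
  | nil => intro a acc; simp [bCutoff, pyAccum, firstGT]
  | cons t rest ih =>
    intro a acc
    simp only [List.map_cons, pyAccum, firstGT, bCutoff]
    by_cases h : acc + (t.length : Int) + 1 ≤ a
    · rw [if_pos h, if_neg (by omega : ¬ a < acc + ((t.length : Int) + 1)), ih a (acc + t.length + 1)]
      have hacc : acc + (t.length : Int) + 1 = acc + ((t.length : Int) + 1) := by ring
      rw [hacc]
      set i' := firstGT (pyAccum (acc + ((t.length : Int) + 1)) (rest.map (fun t => (t.length : Int) + 1))) a with hi'
      cases i' with
      | zero => simp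
      | succ m => simp
    · rw [if_neg h, if_pos (by omega : a < acc + ((t.length : Int) + 1))]
      simp

lemma aLoopLeft_dead (turns : List (List Int)) : ∀ amount acc : Int, amount ≤ acc → aLoopLeft turns amount acc = [] := by
  induction turns with
  | nil => intro _ _ _; rfl
  | cons t rest ih =>
    intro amount acc h
    simp only [aLoopLeft, if_neg (by omega : ¬ acc < amount)]
    exact ih amount acc h

lemma aLoopRight_dead (turns : List (List Int)) : ∀ amount acc : Int, amount ≤ acc → aLoopRight turns amount acc = [] := by
  induction turns with
  | nil => intro _ _ _; rfl
  | cons t rest ih =>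
    intro amount acc h
    simp only [aLoopRight, if_neg (by omega : ¬ acc < amount)]
    exact ih amount acc h

lemma main_left (turns : List (List Int)) : ∀ amount acc : Int,
    aLoopLeft turns amount acc = bBuild turns amount acc true := by
  induction turns with
  | nil => intro amount acc; rfl
  | cons t rest ih =>
    intro amount acc
    by_cases h1 : acc + (t.length : Int) + 1 ≤ amount
    · have hlt : acc < amount := by omega
      simp only [aLoopLeft, if_pos hlt, if_pos (by omega : (t.length : Int) + 1 ≤ amount - acc)]
      rw [ih amount (acc + t.length + 1)]
      simp only [bBuild, bCutoff, if_pos h1, List.take_succ_cons, List.drop_succ_cons]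
      cases hrest : rest.drop (bCutoff rest amount (acc + ↑t.length + 1)).1 with
      | nil => simp
      | cons u us => by_cases hr : (1:Int) ≤ amount - (bCutoff rest amount (acc + ↑t.length + 1)).2 <;> simp [hr]
    · by_cases h2 : acc < amount
      · simp only [aLoopLeft, if_pos h2, if_neg (by omega : ¬ (t.length : Int) + 1 ≤ amount - acc)]
        simp only [bBuild, bCutoff, if_neg h1, List.take_zero, List.drop_zero,
          if_pos (by omega : (1:Int) ≤ amount - acc), List.nil_append]
        have harg : -(amount - acc) + 1 = -(amount - acc - 1) := by ring
        rw [harg]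
        simp
      · simp only [aLoopLeft, if_neg h2]
        rw [aLoopLeft_dead rest amount acc (by omega)]
        simp only [bBuild, bCutoff, if_neg h1, List.take_zero, List.drop_zero,
          if_neg (by omega : ¬ (1:Int) ≤ amount - acc)]

lemma main_right (turns : List (List Int)) : ∀ amount acc : Int,
    aLoopRight turns amount acc = bBuild turns amount acc false := by
  induction turns with
  | nil => intro amount acc; rfl
  | cons t rest ih =>
    intro amount acc
    by_cases h1 : acc + (t.length : Int) + 1 ≤ amount
    · have hlt : acc < amount := by omega
      simp only [aLoopRight, if_pos hlt, if_pos (by omega : (t.length : Int) + 1 ≤ amount - acc)]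
      rw [ih amount (acc + t.length + 1)]
      simp only [bBuild, bCutoff, if_pos h1, List.take_succ_cons, List.drop_succ_cons]
      cases hrest : rest.drop (bCutoff rest amount (acc + ↑t.length + 1)).1 with
      | nil => simp
      | cons u us => by_cases hr : (1:Int) ≤ amount - (bCutoff rest amount (acc + ↑t.length + 1)).2 <;> simp [hr]
    · by_cases h2 : acc < amount
      · simp only [aLoopRight, if_pos h2, if_neg (by omega : ¬ (t.length : Int) + 1 ≤ amount - acc)]
        simp only [bBuild, bCutoff, if_neg h1, List.take_zero, List.drop_zero,
          if_pos (by omega : (1:Int) ≤ amount - acc), List.nil_append]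
        simp
      · simp only [aLoopRight, if_neg h2]
        rw [aLoopRight_dead rest amount acc (by omega)]
        simp only [bBuild, bCutoff, if_neg h1, List.take_zero, List.drop_zero,
          if_neg (by omega : ¬ (1:Int) ≤ amount - acc)]

lemma total_eq (sentences : List (List Int)) :
    (sentences.flatten.length : Int) + sentences.length
      = (sentences.map (fun t => (t.length : Int) + 1)).sum := by
  induction sentences with
  | nil => simp
  | cons t rest ih => simp only [List.flatten_cons, List.length_append, List.map_cons,
      List.sum_cons, List.length_cons] at *; push_cast at *; omega

-- B's assembly equals the single-pass cutoff scan + build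
lemma assemble_eq (turns : List (List Int)) (a : Int) (l : Bool)
    (h : ¬ ((turns.map (fun t => (t.length : Int) + 1)).sum ≤ a)) :
    bAssemble turns (pyAccum 0 (turns.map (fun t => (t.length : Int) + 1))) a l
      = bBuild turns a 0 l := by
  by_cases hne : turns = []
  · rw [hne] at h ⊢
    have ha : a < 0 := by simp at h; omega
    simp [bAssemble, bBuild, bCutoff, pyAccum, bsearchCut, bsearchGo]
    omega
  set costs := turns.map (fun t => (t.length : Int) + 1) with hcosts
  set pre := pyAccum 0 costs with hpre
  have hc1 : ∀ c ∈ costs, 1 ≤ c := by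
    intro c hc
    rw [hcosts] at hc
    simp only [List.mem_map] at hc
    obtain ⟨t, _, rfl⟩ := hc
    omega
  have hlen : pre.length = turns.length := by
    rw [hpre, accum_length, hcosts, List.length_map]
  have hmono : ∀ k j : Nat, k ≤ j → j < pre.length → pre.getD k 0 ≤ pre.getD j 0 := by
    intro k j hkj hj
    exact accum_mono costs 0 k j hc1 hkj (by rwa [← hpre])
  have hbs : bsearchCut pre a 0 pre.length = firstGT pre a := bsearch_eq pre a hmono
  have hcut := cutoff_eq turns a 0
  rw [← hcosts, ← hpre] at hcut
  have hflt : firstGT pre a < pre.length := by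
    rcases Nat.lt_or_ge (firstGT pre a) pre.length with hx | hx
    · exact hx
    · exfalso
      have heq : firstGT pre a = pre.length := le_antisymm (firstGT_le_length pre a) hx
      have hcne : costs ≠ [] := by
        intro hnil
        exact hne (by rwa [hcosts, List.map_eq_nil_iff] at hnil)
      have hlast := accum_getLast costs 0 hcne
      have hplen : 0 < pre.length := by
        rw [hpre, accum_length]
        exact List.length_pos_of_ne_nil hcne
      have hgl : pre.getD (pre.length - 1) 0 = 0 + costs.sum := by
        rw [← hpre] at hlast
        have h2 : pre[pre.length - 1]? = some (0 + costs.sum) := by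
          rw [← List.getLast?_eq_getElem?]
          exact hlast
        simp [List.getD_eq_getElem?_getD, h2]
      have := firstGT_below pre a (pre.length - 1) (by omega)
      rw [hgl] at this
      omega
  have hdrop : turns.drop (firstGT pre a) = turns[firstGT pre a]'(by omega) :: turns.drop (firstGT pre a + 1) :=
    List.drop_eq_getElem_cons (by omega)
  have hgetD : turns.getD (firstGT pre a) [] = turns[firstGT pre a]'(by omega) :=
    List.getD_eq_getElem turns [] (by omega)
  simp only [bAssemble, bBuild, hbs, hcut, hdrop, hgetD]
  cases l <;> by_cases hr : (1:Int) ≤ a - (if firstGT pre a = 0 then 0 else pre.getD (firstGT pre a - 1) 0) <;>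
    simp [hr]

-- B written in the single-pass shape used by the A-side lemmas
lemma alt_eq (s : List (List Int)) (a : Int) (l : Bool) :
    truncate_dialogs_alt s (some a) l =
      if (s.map (fun t => (t.length : Int) + 1)).sum ≤ a then s
      else if l then (bBuild s.reverse a 0 true).reverse else bBuild s a 0 false := by
  have hsum : ((if l then s.reverse else s).map (fun t => (t.length : Int) + 1)).sum
      = (s.map (fun t => (t.length : Int) + 1)).sum := by
    cases l
    · simp
    · show ((s.reverse).map _).sum = _
      rw [List.map_reverse]
      exact List.sum_reverse _
  simp only [truncate_dialogs_alt]
  by_cases hnil : pyAccum 0 ((if l then s.reverse else s).map (fun t => (t.length : Int) + 1)) = []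
  · rw [if_pos hnil]
    have hmnil : (if l then s.reverse else s).map (fun t => (t.length : Int) + 1) = [] := by
      have := accum_length ((if l then s.reverse else s).map (fun t => (t.length : Int) + 1)) 0
      rw [hnil] at this
      exact List.eq_nil_of_length_eq_zero this.symm
    have hs : s = [] := by
      rw [List.map_eq_nil_iff] at hmnil
      cases l <;> simp_all
    subst hs
    simp [bBuild, bCutoff]
  · rw [if_neg hnil]
    have hcne : (if l then s.reverse else s).map (fun t => (t.length : Int) + 1) ≠ [] := by
      intro hm
      apply hnil
      rw [hm]
      rfl
    have hgl : (pyAccum 0 ((if l then s.reverse else s).map (fun t => (t.length : Int) + 1))).getLastD 0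
        = ((if l then s.reverse else s).map (fun t => (t.length : Int) + 1)).sum := by
      rw [List.getLastD_eq_getLast?, accum_getLast _ 0 hcne]
      simp
    rw [hgl, hsum]
    by_cases hle : (s.map (fun t => (t.length : Int) + 1)).sum ≤ a
    · rw [if_pos hle, if_pos hle]
    · rw [if_neg hle, if_neg hle]
      rw [assemble_eq (if l then s.reverse else s) a l (by rwa [hsum])]
      cases l <;> simp

-- ===== VERDICT (by name: the statement is the Claim_ definition above) =====
theorem truncate_dialogs_spec : Claim_equal_truncate_dialogs := by
  intro sentences amount left _
  unfold Spec_truncate_dialogs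
  cases amount with
  | none => rfl
  | some a =>
    rw [show truncate_dialogs_alt sentences (some a) left = _ from alt_eq sentences a left]
    simp only [truncate_dialogs]
    have hte := total_eq sentences
    by_cases htot : (sentences.map (fun t => (t.length : Int) + 1)).sum ≤ a
    · rw [if_pos (by omega), if_pos htot]
    · rw [if_neg (by omega : ¬ ((sentences.flatten.length : Int) + sentences.length ≤ a)),
        if_neg htot]
      cases left with
      | false => simp [main_right]
      | true => simp [main_left]
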